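-- pv_equiv track=rewrite | github.com/Yawn-Sean/Daily_CF_Problems | daily_problems/2025/04/0401/personal_submission/cf691c_liryc.py | solve
-- ===== SOURCE A (Python) =====
-- def solve(s: str) -> str:
--     dot = False
--     ans = []
--     e = 0
--     d = 1
--     for c in s:
--         if c == '.':
--             dot = True
--             if ans:
--                 d = 0
--             else:
--                 e = -1
--                 d = -1
--         elif c == '0':
--             if ans:
--                 e += d
--                 ans.append(c)
--             else:
--                 if dot:
--                     e -= 1
--         else:
--             if ans:
--                 ans.append(c)
--                 if not dot:
--                     e += 1
--             else:
--                 ans = [c, '.']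
--                 if dot:
--                     d = 0
--                 else:
--                     d = 1
--     r = len(ans) - 1
--     while ans[r] == '0':
--         r -= 1
--     if ans[r] == '.':
--         r -= 1
--     return ''.join(ans[:r + 1]) + ('' if e == 0 else 'E' + str(e))
-- ===== SOURCE B (Python) =====
-- def solve(s: str) -> str:
--     k = 0
--     while s[k] in '0.':  # IndexError when s has no significant char, as in A
--         k += 1
--     head, c, tail = s[:k], s[k], s[k + 1:]
--     if '.' in head:
--         e = head.rindex('.') - len(head)
--     else:
--         e = len(tail.split('.', 1)[0])
--     frac = tail.replace('.', '').rstrip('0')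
--     m = c + ('.' + frac if frac else '')
--     return m + ('' if e == 0 else 'E' + str(e))
-- ===== Notes on version B (the rewrite author's own statement) =====
-- stated objective: simpler
-- what changed: Replaces A's four-variable state-machine fold (dot/ans/e/d) with a direct decomposition: split the string at the first significant character and compute the exponent and mantissa by closed-form string operations (rindex/split for the exponent, replace+rstrip for the mantissa).
-- outside the precondition, e.g. on solve('0'): A raises IndexError, B raises IndexError; on solve('.'): A raises IndexError, B raises IndexError
import Mathlib
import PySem

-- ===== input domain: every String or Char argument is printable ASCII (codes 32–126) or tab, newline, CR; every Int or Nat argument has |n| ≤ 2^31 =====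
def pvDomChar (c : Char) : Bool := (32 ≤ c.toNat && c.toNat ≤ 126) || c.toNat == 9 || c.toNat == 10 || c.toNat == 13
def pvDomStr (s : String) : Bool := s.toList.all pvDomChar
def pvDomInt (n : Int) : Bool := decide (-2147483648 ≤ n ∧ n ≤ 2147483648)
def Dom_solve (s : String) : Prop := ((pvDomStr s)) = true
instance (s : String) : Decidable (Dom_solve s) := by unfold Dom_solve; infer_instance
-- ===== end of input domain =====

-- B replaces A's four-variable state-machine fold with a split at the first significant
-- character plus closed-form exponent/mantissa computations (objective: simpler).

-- ===== PORT A =====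
-- one step of A's for-loop over the characters; state = (dot, ans, e, d)
def stepA (st : Bool × List Char × Int × Int) (c : Char) : Bool × List Char × Int × Int :=
  let (dot, ans, e, d) := st
  if c == '.' then
    if ans ≠ [] then (true, ans, e, 0) else (true, ans, -1, -1)
  else if c == '0' then
    if ans ≠ [] then (dot, ans ++ ['0'], e + d, d)
    else if dot then (dot, ans, e - 1, d) else (dot, ans, e, d)
  else
    if ans ≠ [] then (dot, ans ++ [c], if dot then e else e + 1, d)
    else (dot, [c, '.'], e, if dot then 0 else 1)

def solve (s : String) : String :=
  let st := s.toList.foldl stepA (false, [], 0, 1)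
  let ans := st.2.1
  let e := st.2.2.1
  -- Python's `while ans[r] == '0': r -= 1` scans from the end; ans[:r+1] after it is
  -- ans with trailing '0's dropped, then one trailing '.' dropped if present.
  -- (On ans = [] Python raises IndexError; that input is excluded by Pre_solve.)
  let stripped := ans.reverse.dropWhile (fun c => c == '0')
  let kept := match stripped with
              | '.' :: rest => rest.reverse
              | l => l.reverse
  String.ofList kept ++ (if e = 0 then "" else "E" ++ PySem.Int.toStr e)

-- ===== PORT B =====
def solve_alt (s : String) : String :=
  let l := s.toList
  -- while s[k] in '0.': k += 1   — k = length of the '0'/'.' prefix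
  let head := l.takeWhile (fun c => c == '0' || c == '.')
  match l.dropWhile (fun c => c == '0' || c == '.') with
  | [] => ""   -- Python B raises IndexError here (excluded by Pre_solve)
  | c :: tail =>
    -- head.rindex('.') - len(head) = -(chars after the last '.') - 1
    let e : Int := if head.contains '.'
                   then -(((head.reverse.takeWhile (fun x => x != '.')).length : Int)) - 1
                   else ((tail.takeWhile (fun x => x != '.')).length : Int)
    -- tail.replace('.','').rstrip('0')
    let frac := ((tail.filter (fun x => x != '.')).reverse.dropWhile (fun x => x == '0')).reverse
    let m := if frac = [] then [c] else c :: '.' :: frac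
    String.ofList m ++ (if e = 0 then "" else "E" ++ PySem.Int.toStr e)

-- ===== PRECONDITION & SPEC =====
-- Pre_ excludes exactly the inputs made of only '0' and '.' characters (including the
-- empty string), on which A raises IndexError (B raises IndexError there too).
def Pre_solve (s : String) : Prop := (s.toList.any (fun c => !(c == '0' || c == '.'))) = true
instance (s : String) : Decidable (Pre_solve s) := by unfold Pre_solve; infer_instance

def pvWitness_solve : String := "1"

def Spec_solve (s : String) (out : String) : Prop := out = solve_alt s
instance (s : String) (out : String) : Decidable (Spec_solve s out) := by unfold Spec_solve; infer_instance

-- ===== CLAIM (what is proved, stated in full; the proofs are below) =====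
def Claim_equal_solve : Prop := ∀ (s : String), Dom_solve s → Pre_solve s → Spec_solve s (solve s)

-- ===== LEMMAS AND PROOFS =====

-- closed form of A's fold over the insignificant prefix (all chars '0' or '.')
theorem foldA_prefix (h : List Char) (hh : ∀ c ∈ h, c = '0' ∨ c = '.') :
    h.foldl stepA (false, [], 0, 1) =
      (h.contains '.', [],
       if h.contains '.' then -(((h.reverse.takeWhile (fun x => x != '.')).length : Int)) - 1 else 0,
       if h.contains '.' then -1 else 1) := by
  induction h using List.reverseRecOn with
  | nil => simp
  | append_singleton h x ih =>
    have hh' : ∀ c ∈ h, c = '0' ∨ c = '.' := fun c hc => hh c (by simp [hc])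
    rw [List.foldl_append, ih hh']
    rcases hh x (by simp) with hx | hx <;> subst hx
    · -- x = '0'
      by_cases hd : '.' ∈ h
      · simp [stepA, hd]
        ring
      · simp [stepA, hd]
    · -- x = '.'
      simp [stepA]

-- closed form of A's fold once ans is nonempty
theorem foldA_main (t : List Char) : ∀ (a : List Char) (e : Int) (dot : Bool), a ≠ [] →
    t.foldl stepA (dot, a, e, if dot then 0 else 1) =
      ((dot || t.contains '.'),
       a ++ t.filter (fun x => x != '.'),
       e + (if dot then 0 else ((t.takeWhile (fun x => x != '.')).length : Int)),
       if (dot || t.contains '.') then 0 else 1) := by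
  induction t with
  | nil => intro a e dot ha; simp
  | cons x t ih =>
    intro a e dot ha
    by_cases hx : x = '.'
    · subst hx
      have h1 : stepA (dot, a, e, if dot = true then 0 else 1) '.' = (true, a, e, 0) := by
        simp [stepA, ha]
      have h2 := ih a e true ha
      norm_num at h2
      rw [List.foldl_cons, h1, h2]
      by_cases hd : dot <;> simp [hd]
    · have hfx : (x == '.') = false := by simp [hx]
      have h1 : stepA (dot, a, e, if dot = true then 0 else 1) x =
          (dot, a ++ [x], e + (if dot = true then 0 else 1), if dot = true then 0 else 1) := by
        by_cases hx0 : x = '0'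
        · subst hx0; simp [stepA, ha]
        · simp [stepA, hfx, hx0, ha]; by_cases hd : dot <;> simp [hd]
      rw [List.foldl_cons, h1, ih (a ++ [x]) _ dot (by simp)]
      have hx' : ¬('.' = x) := fun hh => hx hh.symm
      have hbx : ('.' == x) = false := by simp [hx']
      have hnx : (x != '.') = true := by simp [bne_iff_ne, hx]
      simp only [List.contains_cons, List.filter_cons, List.takeWhile_cons, hnx,
        List.append_assoc, List.singleton_append, Prod.mk.injEq, if_true, hbx]
      refine ⟨by simp, ?_, ?_, by simp⟩
      · simp
      · by_cases hd : dot <;> simp [hd] <;> ring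

-- head of a nonempty dropWhile fails the predicate
theorem dropWhile_head_false {α : Type} (p : α → Bool) (l : List α) (c : α) (t : List α)
    (hd : l.dropWhile p = c :: t) : p c = false := by
  induction l with
  | nil => simp at hd
  | cons x xs ih =>
    rw [List.dropWhile_cons] at hd
    by_cases hx : p x
    · rw [if_pos hx] at hd; exact ih hd
    · rw [if_neg hx] at hd
      cases hd
      simpa using hx

-- ===== VERDICT (by name: the statement is the Claim_ definition above) =====
theorem solve_spec : Claim_equal_solve := by
  intro s _ hpre
  unfold Spec_solve solve solve_alt
  have hsplit := (List.takeWhile_append_dropWhile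
      (p := fun c => c == '0' || c == '.') (l := s.toList))
  cases hd : s.toList.dropWhile (fun c => c == '0' || c == '.') with
  | nil =>
    exfalso
    obtain ⟨c, hc, hcn⟩ := List.any_eq_true.mp hpre
    have := (List.dropWhile_eq_nil_iff.mp hd) c hc
    simp at this hcn
    rcases this with h | h
    · exact hcn.1 h
    · exact hcn.2 h
    
  | cons c t =>
    have hh : ∀ x ∈ s.toList.takeWhile (fun c => c == '0' || c == '.'), x = '0' ∨ x = '.' := by
      intro x hx
      have := List.mem_takeWhile_imp hx
      simpa using this
    have hcP : ((c == '0') || (c == '.')) = false :=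
      dropWhile_head_false _ s.toList c t hd
    have hc0 : ¬(c = '0') := by
      intro hh0; rw [hh0] at hcP; simp at hcP
    have hcdot : ¬(c = '.') := by
      intro hh0; rw [hh0] at hcP; simp at hcP
    set H := s.toList.takeWhile (fun c => c == '0' || c == '.') with hH
    have hfold : s.toList.foldl stepA (false, [], 0, 1) =
        List.foldl stepA (List.foldl stepA (false, [], 0, 1) H) (c :: t) := by
      conv_lhs => rw [← hsplit, hd]
      rw [List.foldl_append]
    rw [foldA_prefix H hh] at hfold
    have hstep : stepA (H.contains '.', [],
        (if H.contains '.' then -(((H.reverse.takeWhile (fun x => x != '.')).length : Int)) - 1 else 0),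
        (if H.contains '.' then -1 else 1)) c =
        (H.contains '.', [c, '.'],
         (if H.contains '.' then -(((H.reverse.takeWhile (fun x => x != '.')).length : Int)) - 1 else 0),
         if H.contains '.' then 0 else 1) := by
      simp [stepA, hc0, hcdot]
    have hmain := foldA_main t [c, '.']
      (if H.contains '.' then -(((H.reverse.takeWhile (fun x => x != '.')).length : Int)) - 1 else 0)
      (H.contains '.') (by simp)
    rw [List.foldl_cons, hstep, hmain] at hfold
    -- both sides are now closed expressions in H, c, t; compare exponent and mantissa
    have he : (if H.contains '.' then -(((H.reverse.takeWhile (fun x => x != '.')).length : Int)) - 1 else 0)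
        + (if H.contains '.' then 0 else ((t.takeWhile (fun x => x != '.')).length : Int)) =
        (if H.contains '.'
         then -(((H.reverse.takeWhile (fun x => x != '.')).length : Int)) - 1
         else ((t.takeWhile (fun x => x != '.')).length : Int)) := by
      by_cases hdot : '.' ∈ H <;> simp [hdot]
    rw [hfold]
    simp only [hd]
    rw [← hH, he]
    set F := t.filter (fun x => x != '.') with hF
    have hnodotF : ∀ x ∈ F.reverse.dropWhile (fun x => x == '0'), x ≠ '.' := by
      intro x hx
      have hx1 : x ∈ F := by
        have := (List.dropWhile_sublist (p := fun x => x == '0') (l := F.reverse)).subset hx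
        simpa using this
      have := List.of_mem_filter hx1
      simpa using this
    have hFr : ([c, '.'] ++ F).reverse = F.reverse ++ ['.', c] := by simp
    rw [hFr, List.dropWhile_append]
    by_cases hE : F.reverse.dropWhile (fun x => x == '0') = []
    · rw [hE]
      simp only [List.isEmpty_nil, if_true, List.reverse_nil]
      simp [List.dropWhile]
    · rw [if_neg (by simp [hE])]
      cases hQ : F.reverse.dropWhile (fun x => x == '0') with
      | nil => exact absurd hQ hE
      | cons y ys =>
        have hy : ¬('.' = y) := fun hh => hnodotF y (by rw [hQ]; simp) hh.symm
        split
        · next rest heq =>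
          exfalso
          rw [List.cons_append] at heq
          injection heq with h1 _
          exact hy h1.symm
        · next hne =>
          simp [List.reverse_append]
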